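-- pv_equiv track=rewrite | github.com/Jiawei-Wang/LeetCode-Study | Almost Equivalent Strings.py | answer
-- ===== SOURCE A (Python) =====
-- from collections import Counter
--
-- def answer(s, t):
--     def compare(first, second):
--         dic1 = dict(Counter(first))
--         dic2 = dict(Counter(second))
--         for e in dic1:
--             if e not in dic2:
--                 dic2[e] = 0
--             if abs(dic1[e] - dic2[e]) > 3:
--                 return False
--         for e in dic2:
--             if e not in dic1:
--                 dic1[e] = 0
--             if abs(dic1[e] - dic2[e]) > 3:
--                 return False
--         return True
--
--     ans = []
--     for i in range(len(s)):
--         first = s[i]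
--         second = t[i]
--         if compare(first, second):
--             ans.append("YES")
--         else:
--             ans.append("NO")
--     return ans
-- ===== SOURCE B (Python) =====
-- def answer(s, t):
--     def almost(first, second):
--         # sort both strings; merge-scan equal-character runs with two pointers
--         a, b = sorted(first), sorted(second)
--         while a or b:
--             ch = a[0] if a and (not b or a[0] <= b[0]) else b[0]
--             ca = 0
--             while ca < len(a) and a[ca] == ch:
--                 ca += 1
--             cb = 0
--             while cb < len(b) and b[cb] == ch:
--                 cb += 1
--             if abs(ca - cb) > 3:
--                 return False
--             a, b = a[ca:], b[cb:]
--         return True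
--
--     return ["YES" if almost(first, second) else "NO" for first, second in zip(s, t)]
-- ===== Notes on version B (the rewrite author's own statement) =====
-- stated objective: alternative
-- what changed: A builds two frequency dicts (Counter) and walks each dict's keys in two loops, mutating the other dict; B uses no counting structure at all: it sorts both strings and merge-scans their equal-character runs with two pointers, comparing run lengths per character.
import Mathlib
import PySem

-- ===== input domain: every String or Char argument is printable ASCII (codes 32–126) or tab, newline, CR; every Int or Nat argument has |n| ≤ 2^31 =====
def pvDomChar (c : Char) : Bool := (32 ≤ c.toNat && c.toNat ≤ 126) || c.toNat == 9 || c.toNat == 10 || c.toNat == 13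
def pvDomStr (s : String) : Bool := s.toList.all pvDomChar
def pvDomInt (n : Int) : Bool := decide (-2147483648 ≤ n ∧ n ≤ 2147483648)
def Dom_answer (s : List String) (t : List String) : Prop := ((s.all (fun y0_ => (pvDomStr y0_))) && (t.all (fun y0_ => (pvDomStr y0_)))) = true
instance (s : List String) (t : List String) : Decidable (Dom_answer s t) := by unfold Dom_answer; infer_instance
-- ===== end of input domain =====

-- B replaces A's two frequency dicts and their two key-walking loops by a different algorithm:
-- sort both strings and merge-scan their equal-character runs with two pointers (objective: alternative).

-- ===== PORT A =====
-- `if e not in dic2: dic2[e] = 0`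
def pvStep (d : PySem.Dict Char Int) (e : Char) : PySem.Dict Char Int :=
  if d.contains e then d else d.insert e 0

-- first loop of `compare`: walks dic1's keys, mutating dic2; `none` = early `return False`
-- (dic1[e] / dic2[e] are direct lookups; the key is present at each use, so getD is exact)
def pvLoop1 : List Char → PySem.Dict Char Int → PySem.Dict Char Int → Option (PySem.Dict Char Int)
  | [], _, dic2 => some dic2
  | e :: rest, dic1, dic2 =>
    let dic2' := pvStep dic2 e
    if 3 < (dic1.getD e 0 - dic2'.getD e 0).natAbs then none
    else pvLoop1 rest dic1 dic2'

-- second loop of `compare`: walks dic2's keys, mutating dic1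
def pvLoop2 : List Char → PySem.Dict Char Int → PySem.Dict Char Int → Bool
  | [], _, _ => true
  | e :: rest, dic1, dic2 =>
    let dic1' := pvStep dic1 e
    if 3 < (dic1'.getD e 0 - dic2.getD e 0).natAbs then false
    else pvLoop2 rest dic1' dic2

def pvCompare (first second : String) : Bool :=
  let dic1 := PySem.Dict.counter first.toList
  let dic2 := PySem.Dict.counter second.toList
  match pvLoop1 dic1.keys dic1 dic2 with
  | none => false
  | some dic2' => pvLoop2 dic2'.keys dic1 dic2'

-- `for i in range(len(s)): … t[i] …`; the `| _, _ => ans` arm is Python's IndexError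
-- (t shorter than s), excluded by Pre_answer
def answer (s : List String) (t : List String) : List String :=
  (List.range s.length).foldl (fun ans (i : Nat) =>
    match PySem.List.pyGet? s (i : Int), PySem.List.pyGet? t (i : Int) with
    | some first, some second => ans ++ [if pvCompare first second then "YES" else "NO"]
    | _, _ => ans) []

-- ===== PORT B =====
-- inner `while c < len(l) and l[c] == ch: c += 1`: length of the leading run of ch
def pvRun (ch : Char) : List Char → Nat
  | [] => 0
  | x :: rest => if x = ch then pvRun ch rest + 1 else 0

-- `ch = a[0] if a and (not b or a[0] <= b[0]) else b[0]` (chars compare by code point, as in Python)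
def pvPick : List Char → List Char → Char
  | x :: _, [] => x
  | x :: _, y :: _ => if x ≤ y then x else y
  | _, y :: _ => y
  | _, _ => default  -- unreachable: the loop guard ensures one list is nonempty

theorem pvRun_le (ch : Char) (l : List Char) : pvRun ch l ≤ l.length := by
  induction l with
  | nil => simp [pvRun]
  | cons x rest ih => simp only [pvRun, List.length_cons]; split <;> omega

theorem pvRun_pos (a b : List Char) (h : ¬(a.isEmpty && b.isEmpty) = true) :
    1 ≤ pvRun (pvPick a b) a + pvRun (pvPick a b) b := by
  match a, b with
  | [], [] => simp [List.isEmpty] at h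
  | x :: _, [] => simp [pvPick, pvRun]
  | [], y :: _ => simp [pvPick, pvRun]
  | x :: _, y :: _ =>
    simp only [pvPick, pvRun]
    split <;> split <;> split <;> simp_all <;> omega

-- the outer `while a or b` loop of `almost`
def pvScan (a b : List Char) : Bool :=
  if a.isEmpty && b.isEmpty then true
  else
    let ch := pvPick a b
    let ca := pvRun ch a
    let cb := pvRun ch b
    if 3 < ((ca : Int) - (cb : Int)).natAbs then false
    else pvScan (a.drop ca) (b.drop cb)
termination_by a.length + b.length
decreasing_by
  simp only [List.length_drop]
  have h1 := pvRun_le (pvPick a b) a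
  have h2 := pvRun_le (pvPick a b) b
  have h3 := pvRun_pos a b (by assumption)
  omega

def pvAlmost (first second : String) : Bool :=
  pvScan (PySem.List.sorted first.toList (fun c => c) false)
         (PySem.List.sorted second.toList (fun c => c) false)

def answer_alt (s : List String) (t : List String) : List String :=
  (s.zip t).map (fun p => if pvAlmost p.1 p.2 then "YES" else "NO")

-- ===== PRECONDITION & SPEC =====
-- Pre_ excludes exactly the inputs where A raises IndexError (t shorter than s)
def Pre_answer (s : List String) (t : List String) : Prop := s.length ≤ t.length
instance (s : List String) (t : List String) : Decidable (Pre_answer s t) := by unfold Pre_answer; infer_instance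
def pvWitness_answer : List String × List String := (["abcd", "aa"], ["a", "aaaa", "x"])

def Spec_answer (s : List String) (t : List String) (out : List String) : Prop := out = answer_alt s t
instance (s : List String) (t : List String) (out : List String) : Decidable (Spec_answer s t out) := by unfold Spec_answer; infer_instance

-- ===== CLAIM (what is proved, stated in full; the proofs are below) =====
def Claim_equal_answer : Prop := ∀ (s : List String) (t : List String), Dom_answer s t → Pre_answer s t → Spec_answer s t (answer s t)

-- ===== LEMMAS AND PROOFS =====

-- ---- A side: pvCompare checks |count diff| ≤ 3 over the union of the two character sets ----

theorem getD_pvStep (d : PySem.Dict Char Int) (e c : Char) :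
    (pvStep d e).getD c 0 = d.getD c 0 := by
  unfold pvStep
  split
  · rfl
  · next h =>
    rw [PySem.Dict.getD_insert]
    split
    · next hc => subst hc; rw [PySem.Dict.getD_of_not_contains _ _ (by simpa using h)]
    · rfl

theorem keys_pvStep (d : PySem.Dict Char Int) (e : Char) :
    (pvStep d e).keys = PySem.Set.add d.keys e := by
  unfold pvStep PySem.Set.add
  split
  · next h => rw [if_pos]; simpa [PySem.Set.contains, ← PySem.Dict.contains_iff_mem_keys] using h
  · next h =>
    rw [PySem.Dict.keys_insert_of_not_contains _ _ (by simpa using h), if_neg]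
    simpa [PySem.Set.contains, ← PySem.Dict.contains_iff_mem_keys] using h

theorem getD_foldl_pvStep (ks : List Char) (d : PySem.Dict Char Int) (c : Char) :
    (ks.foldl pvStep d).getD c 0 = d.getD c 0 := by
  induction ks generalizing d with
  | nil => rfl
  | cons e rest ih => simp [List.foldl_cons, ih, getD_pvStep]

theorem keys_foldl_pvStep (ks : List Char) (d : PySem.Dict Char Int) :
    (ks.foldl pvStep d).keys = PySem.Set.update d.keys ks := by
  induction ks generalizing d with
  | nil => rfl
  | cons e rest ih => simp [List.foldl_cons, ih, keys_pvStep, PySem.Set.update]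

theorem pvLoop1_eq (ks : List Char) (dic1 dic2 : PySem.Dict Char Int) :
    pvLoop1 ks dic1 dic2 =
      if ks.all (fun e => decide ((dic1.getD e 0 - dic2.getD e 0).natAbs ≤ 3))
      then some (ks.foldl pvStep dic2) else none := by
  induction ks generalizing dic2 with
  | nil => rfl
  | cons e rest ih =>
    show (if 3 < (dic1.getD e 0 - (pvStep dic2 e).getD e 0).natAbs then none
          else pvLoop1 rest dic1 (pvStep dic2 e)) = _
    rw [getD_pvStep, ih]
    have hc : ∀ x, (dic1.getD x 0 - (pvStep dic2 e).getD x 0).natAbs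
        = (dic1.getD x 0 - dic2.getD x 0).natAbs := fun x => by rw [getD_pvStep]
    simp only [List.all_cons, List.foldl_cons, hc]
    by_cases h : 3 < (dic1.getD e 0 - dic2.getD e 0).natAbs
    · simp [h, Nat.not_le.mpr h]
    · simp only [if_neg h]
      have : (decide ((dic1.getD e 0 - dic2.getD e 0).natAbs ≤ 3)) = true := by
        simpa using Nat.not_lt.mp h
      simp [this]

theorem pvLoop2_eq (ks : List Char) (dic1 dic2 : PySem.Dict Char Int) :
    pvLoop2 ks dic1 dic2 =
      ks.all (fun e => decide ((dic1.getD e 0 - dic2.getD e 0).natAbs ≤ 3)) := by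
  induction ks generalizing dic1 with
  | nil => rfl
  | cons e rest ih =>
    show (if 3 < ((pvStep dic1 e).getD e 0 - dic2.getD e 0).natAbs then false
          else pvLoop2 rest (pvStep dic1 e) dic2) = _
    rw [getD_pvStep, ih]
    have hc : ∀ x, ((pvStep dic1 e).getD x 0 - dic2.getD x 0).natAbs
        = (dic1.getD x 0 - dic2.getD x 0).natAbs := fun x => by rw [getD_pvStep]
    simp only [List.all_cons, hc]
    by_cases h : 3 < (dic1.getD e 0 - dic2.getD e 0).natAbs
    · simp [h, Nat.not_le.mpr h]
    · have : (decide ((dic1.getD e 0 - dic2.getD e 0).natAbs ≤ 3)) = true := by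
        simpa using Nat.not_lt.mp h
      simp [h, this]

theorem pvCompare_iff (first second : String) :
    pvCompare first second = true ↔
      ∀ c, (c ∈ first.toList ∨ c ∈ second.toList) →
        ((first.toList.count c : Int) - second.toList.count c).natAbs ≤ 3 := by
  unfold pvCompare
  dsimp only
  rw [pvLoop1_eq]
  by_cases h1 : ((PySem.Dict.counter first.toList).keys.all
      (fun e => decide (((PySem.Dict.counter first.toList).getD e 0 -
        (PySem.Dict.counter second.toList).getD e 0).natAbs ≤ 3))) = true
  · rw [if_pos h1]
    dsimp only
    rw [pvLoop2_eq, keys_foldl_pvStep]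
    simp only [getD_foldl_pvStep, PySem.Dict.getD_counter, PySem.Dict.keys_counter] at *
    simp only [List.all_eq_true, PySem.Set.mem_update, PySem.Set.mem_ofList, decide_eq_true_eq] at *
    constructor
    · intro h c hc
      rcases hc with hc | hc
      · exact h1 c hc
      · exact h c (Or.inl hc)
    · intro h c hc
      rcases hc with hc | hc
      · exact h c (Or.inr hc)
      · exact h c (Or.inl hc)
  · rw [if_neg h1]
    simp only [PySem.Dict.keys_counter, PySem.Dict.getD_counter, List.all_eq_true,
      PySem.Set.mem_ofList, decide_eq_true_eq, not_forall] at h1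
    obtain ⟨c, hc, hq⟩ := h1
    constructor
    · intro h; cases h
    · intro h; exact (hq (h c (Or.inl hc))).elim

-- ---- B side: pvScan on sorted lists checks the same condition ----

theorem take_pvRun (ch : Char) (l : List Char) :
    l.take (pvRun ch l) = List.replicate (pvRun ch l) ch := by
  induction l with
  | nil => simp [pvRun]
  | cons x rest ih =>
    simp only [pvRun]
    split
    · next h => subst h; simp [List.take_succ_cons, List.replicate_succ, ih]
    · simp

theorem count_drop_pvRun (ch c : Char) (l : List Char) :
    ((l.drop (pvRun ch l)).count c : Int) =
      l.count c - (if c = ch then (pvRun ch l : Int) else 0) := by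
  have h := List.take_append_drop (pvRun ch l) l
  have := congrArg (fun m => (List.count c m : Int)) h
  simp only [List.count_append, take_pvRun, List.count_replicate] at this
  rcases eq_or_ne c ch with hc | hc
  · subst hc
    simp only [BEq.rfl, if_true] at this ⊢
    push_cast at this; omega
  · rw [if_neg (by simp [Ne.symm hc])] at this
    rw [if_neg hc]
    push_cast at this; omega

theorem count_eq_pvRun (ch : Char) (l : List Char)
    (hs : l.Pairwise (· ≤ ·)) (hlb : ∀ y ∈ l, ch ≤ y) :
    l.count ch = pvRun ch l := by
  induction l with
  | nil => simp [pvRun]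
  | cons x rest ih =>
    rcases List.pairwise_cons.mp hs with ⟨hx, hrest⟩
    simp only [pvRun]
    by_cases h : x = ch
    · subst h
      rw [if_pos rfl, List.count_cons_self, ih hrest (fun y hy => hx y hy)]
    · rw [if_neg h]
      have hch : ch < x := lt_of_le_of_ne (hlb x (by simp)) (fun h' => h h'.symm)
      have : ch ∉ x :: rest := by
        intro hm
        rcases List.mem_cons.mp hm with h' | h'
        · exact h h'.symm
        · exact absurd (hx ch h') (not_le.mpr hch)
      simpa using List.count_eq_zero.mpr this

theorem pvPick_spec (a b : List Char) (h : ¬(a.isEmpty && b.isEmpty) = true)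
    (ha : a.Pairwise (· ≤ ·)) (hb : b.Pairwise (· ≤ ·)) :
    (pvPick a b ∈ a ∨ pvPick a b ∈ b) ∧
      (∀ y ∈ a, pvPick a b ≤ y) ∧ (∀ y ∈ b, pvPick a b ≤ y) := by
  match a, b with
  | [], [] => simp [List.isEmpty] at h
  | x :: as, [] =>
    refine ⟨Or.inl (by simp [pvPick]), ?_, by simp⟩
    intro y hy
    rcases List.mem_cons.mp hy with h' | h'
    · simp [pvPick, h']
    · exact (List.pairwise_cons.mp ha).1 y h'
  | [], y :: bs =>
    refine ⟨Or.inr (by simp [pvPick]), by simp, ?_⟩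
    intro z hz
    rcases List.mem_cons.mp hz with h' | h'
    · simp [pvPick, h']
    · exact (List.pairwise_cons.mp hb).1 z h'
  | x :: as, y :: bs =>
    have hax : ∀ z ∈ x :: as, x ≤ z := by
      intro z hz
      rcases List.mem_cons.mp hz with h' | h'
      · simp [h']
      · exact (List.pairwise_cons.mp ha).1 z h'
    have hby : ∀ z ∈ y :: bs, y ≤ z := by
      intro z hz
      rcases List.mem_cons.mp hz with h' | h'
      · simp [h']
      · exact (List.pairwise_cons.mp hb).1 z h'
    simp only [pvPick]
    split
    · next hxy =>
      exact ⟨Or.inl (by simp), hax, fun z hz => le_trans hxy (hby z hz)⟩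
    · next hxy =>
      exact ⟨Or.inr (by simp), fun z hz => le_trans (le_of_not_ge hxy) (hax z hz), hby⟩

theorem mem_drop_pvRun (ch c : Char) (l : List Char) (hc : c ∈ l) (hne : c ≠ ch) :
    c ∈ l.drop (pvRun ch l) := by
  have h := List.take_append_drop (pvRun ch l) l
  rw [← h, List.mem_append] at hc
  rcases hc with h' | h'
  · rw [take_pvRun] at h'
    exact absurd (List.eq_of_mem_replicate h') hne
  · exact h'

theorem pvScan_iff_aux : ∀ (n : Nat) (a b : List Char), a.length + b.length ≤ n →
    a.Pairwise (· ≤ ·) → b.Pairwise (· ≤ ·) →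
    (pvScan a b = true ↔
      ∀ c, (c ∈ a ∨ c ∈ b) → ((a.count c : Int) - b.count c).natAbs ≤ 3) := by
  intro n
  induction n with
  | zero =>
    intro a b hle ha hb
    match a, b with
    | [], [] => simp [pvScan]
    | x :: _, _ => simp at hle
    | [], y :: _ => simp at hle
  | succ n ih =>
    intro a b hle ha hb
    by_cases hemp : (a.isEmpty && b.isEmpty) = true
    · have hae : a = [] := by cases a <;> simp_all
      have hbe : b = [] := by cases b <;> simp_all
      subst hae; subst hbe; simp [pvScan]
    · rw [pvScan, if_neg hemp]
      obtain ⟨hmem, hla, hlb⟩ := pvPick_spec a b hemp ha hb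
      have hca : a.count (pvPick a b) = pvRun (pvPick a b) a :=
        count_eq_pvRun _ a ha hla
      have hcb : b.count (pvPick a b) = pvRun (pvPick a b) b :=
        count_eq_pvRun _ b hb hlb
      have ha' : (a.drop (pvRun (pvPick a b) a)).Pairwise (· ≤ ·) :=
        ha.sublist (List.drop_sublist _ _)
      have hb' : (b.drop (pvRun (pvPick a b) b)).Pairwise (· ≤ ·) :=
        hb.sublist (List.drop_sublist _ _)
      have hlen : (a.drop (pvRun (pvPick a b) a)).length +
          (b.drop (pvRun (pvPick a b) b)).length ≤ n := by
        have h1 := pvRun_le (pvPick a b) a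
        have h2 := pvRun_le (pvPick a b) b
        have h3 := pvRun_pos a b hemp
        simp only [List.length_drop]
        omega
      have IH := ih _ _ hlen ha' hb'
      dsimp only
      by_cases h3 : 3 < ((pvRun (pvPick a b) a : Int) - (pvRun (pvPick a b) b : Int)).natAbs
      · rw [if_pos h3]
        simp only [Bool.false_eq_true, false_iff, not_forall]
        refine ⟨pvPick a b, hmem, ?_⟩
        rw [hca, hcb]
        omega
      · rw [if_neg h3, IH]
        constructor
        · intro h c hc
          rcases eq_or_ne c (pvPick a b) with rfl | hne
          · rw [hca, hcb]; omega
          · have hc' : c ∈ a.drop (pvRun (pvPick a b) a) ∨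
                c ∈ b.drop (pvRun (pvPick a b) b) := by
              rcases hc with h' | h'
              · exact Or.inl (mem_drop_pvRun _ c a h' hne)
              · exact Or.inr (mem_drop_pvRun _ c b h' hne)
            have hP := h c hc'
            have e1 := count_drop_pvRun (pvPick a b) c a
            have e2 := count_drop_pvRun (pvPick a b) c b
            rw [if_neg hne] at e1 e2
            omega
        · intro h c hc
          have e1 := count_drop_pvRun (pvPick a b) c a
          have e2 := count_drop_pvRun (pvPick a b) c b
          rcases eq_or_ne c (pvPick a b) with rfl | hne
          · rw [if_pos rfl] at e1 e2
            rw [hca] at e1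
            rw [hcb] at e2
            omega
          · rw [if_neg hne] at e1 e2
            have hcm : c ∈ a ∨ c ∈ b := by
              rcases hc with h' | h'
              · exact Or.inl (List.mem_of_mem_drop h')
              · exact Or.inr (List.mem_of_mem_drop h')
            have hP := h c hcm
            omega

theorem pvScan_iff (a b : List Char)
    (ha : a.Pairwise (· ≤ ·)) (hb : b.Pairwise (· ≤ ·)) :
    pvScan a b = true ↔
      ∀ c, (c ∈ a ∨ c ∈ b) → ((a.count c : Int) - b.count c).natAbs ≤ 3 :=
  pvScan_iff_aux (a.length + b.length) a b le_rfl ha hb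

theorem pvCompare_eq_pvAlmost (first second : String) :
    pvCompare first second = pvAlmost first second := by
  have ha := PySem.List.sorted_pairwise first.toList (fun c => c)
  have hb := PySem.List.sorted_pairwise second.toList (fun c => c)
  have hpa := PySem.List.sorted_perm first.toList (fun c => c) false
  have hpb := PySem.List.sorted_perm second.toList (fun c => c) false
  rw [Bool.eq_iff_iff, pvCompare_iff]
  unfold pvAlmost
  rw [pvScan_iff _ _ ha hb]
  constructor
  · intro h c hc
    rw [hpa.count_eq, hpb.count_eq]
    exact h c (by rwa [hpa.mem_iff, hpb.mem_iff] at hc)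
  · intro h c hc
    have := h c (by rwa [hpa.mem_iff, hpb.mem_iff])
    rwa [hpa.count_eq, hpb.count_eq] at this

-- ---- outer loop ----

theorem answer_spec_aux (s t : List String) (h : s.length ≤ t.length) :
    answer s t = answer_alt s t := by
  unfold answer answer_alt
  rw [PySem.List.foldl_congr_mem _ _
      (fun ans i => ans ++ [if pvCompare (s.getD i "") (t.getD i "") then "YES" else "NO"]) []
      (by
        intro acc x hx
        have hxs : x < s.length := List.mem_range.mp hx
        have hxt : x < t.length := lt_of_lt_of_le hxs h
        rw [PySem.List.pyGet?_natCast, PySem.List.pyGet?_natCast,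
            List.getElem?_eq_getElem hxs, List.getElem?_eq_getElem hxt]
        dsimp only
        rw [List.getD_eq_getElem s "" hxs, List.getD_eq_getElem t "" hxt])]
  rw [PySem.List.foldl_append_singleton_eq_map, List.nil_append]
  apply List.ext_getElem
  · simp [Nat.min_eq_left h]
  · intro i h1 h2
    simp only [List.getElem_map, List.getElem_range, List.getElem_zip]
    have hxs : i < s.length := by simpa using h1
    rw [List.getD_eq_getElem s "" hxs, List.getD_eq_getElem t "" (lt_of_lt_of_le hxs h),
        pvCompare_eq_pvAlmost]

-- ===== VERDICT (by name: the statement is the Claim_ definition above) =====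
theorem answer_spec : Claim_equal_answer := by
  intro s t _ hpre
  exact answer_spec_aux s t hpre
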